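-- pv_equiv track=rewrite | github.com/FractonicMind/TernaryMoralLogic | oracles/oracle_bridge.py | _detects_weakening
-- ===== SOURCE A (Python) =====
-- from typing import Dict, List, Optional, Tuple
--
-- def _detects_weakening(changes: List[str]) -> bool:
--     """
--     Detect if changes weaken environmental protection
--
--     Args:
--         changes: List of detected changes
--
--     Returns:
--         True if protection weakened
--     """
--     weakening_indicators = [
--         "budget_increased",
--         "threshold_relaxed",
--         "protection_removed",
--         "timeline_extended"
--     ]
--
--     for change in changes:
--         if any(indicator in change.lower() for indicator in weakening_indicators):
--             return True
--
--     return False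
-- ===== SOURCE B (Python) =====
-- def _detects_weakening(changes):
--     """
--     Detect if changes weaken environmental protection
--
--     Args:
--         changes: List of detected changes
--
--     Returns:
--         True if protection weakened
--     """
--     indicators = [
--         "budget_increased",
--         "threshold_relaxed",
--         "protection_removed",
--         "timeline_extended",
--     ]
--     # first-character dispatch index: at each scan position only the
--     # indicators starting with that character are tried
--     by_first = {}
--     for ind in indicators:
--         by_first.setdefault(ind[0], []).append(ind)
--     for change in changes:
--         s = change.lower()
--         for i in range(len(s)):
--             for ind in by_first.get(s[i], []):
--                 if s.startswith(ind, i):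
--                     return True
--     return False
-- ===== Notes on version B (the rewrite author's own statement) =====
-- stated objective: alternative
-- what changed: B replaces A's per-indicator substring `in` scans over each lowered change with a single left-to-right position scan per change that dispatches through a first-character index (dict from first char to candidate indicators) and tests a prefix match at each position.
import Mathlib
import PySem

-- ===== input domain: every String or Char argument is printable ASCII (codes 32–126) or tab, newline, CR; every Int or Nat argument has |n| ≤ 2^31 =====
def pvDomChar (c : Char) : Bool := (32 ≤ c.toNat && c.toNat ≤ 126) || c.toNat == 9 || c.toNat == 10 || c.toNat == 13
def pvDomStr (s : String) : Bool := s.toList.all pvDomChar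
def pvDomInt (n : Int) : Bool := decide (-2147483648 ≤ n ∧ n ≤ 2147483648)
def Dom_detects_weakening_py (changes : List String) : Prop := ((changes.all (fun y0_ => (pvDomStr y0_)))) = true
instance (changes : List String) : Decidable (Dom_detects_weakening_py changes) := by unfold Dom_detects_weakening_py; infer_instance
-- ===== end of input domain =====

-- B scans each lowered change position by position, dispatching through a first-character
-- index to the candidate indicators, instead of A's per-indicator substring scans (alternative
-- decomposition, similar cost).

-- ===== PORT A =====
def detects_weakening_py (changes : List String) : Bool :=
  let weakening_indicators : List String :=
    ["budget_increased", "threshold_relaxed", "protection_removed", "timeline_extended"]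
  changes.any (fun change =>
    weakening_indicators.any (fun indicator => PySem.Str.isIn indicator (PySem.Str.lower change)))

-- ===== PORT B =====
-- by_first = {}; for ind in indicators: by_first.setdefault(ind[0], []).append(ind)
def pvByFirst : PySem.Dict Char (List String) :=
  ["budget_increased", "threshold_relaxed", "protection_removed", "timeline_extended"].foldl
    (fun d ind =>
      match PySem.Str.pyGet? ind 0 with      -- ind[0]
      | some c => d.modify c [] (fun l => l ++ [ind])   -- setdefault(…, []).append(ind)
      | none => d)
    PySem.Dict.empty

-- the inner 'for i in range(len(s)): for ind in by_first.get(s[i], []): if s.startswith(ind, i): return True'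
-- (s.startswith(ind, i) with 0 ≤ i ≤ len(s) is exactly 'ind is a prefix of s from position i')
def pvScan (sL : List Char) : Bool :=
  (List.range sL.length).any (fun i =>
    match sL[i]? with                         -- s[i], i ∈ range(len(s)) so in range
    | some c => (pvByFirst.getD c []).any
        (fun ind => PySem.Chars.startswith (sL.drop i) ind.toList)
    | none => false)

def detects_weakening_py_alt (changes : List String) : Bool :=
  changes.any (fun change => pvScan (PySem.Chars.lower change.toList))

-- ===== PRECONDITION & SPEC =====
def Spec_detects_weakening_py (changes : List String) (out : Bool) : Prop := out = detects_weakening_py_alt changes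
instance (changes : List String) (out : Bool) : Decidable (Spec_detects_weakening_py changes out) := by unfold Spec_detects_weakening_py; infer_instance

-- ===== CLAIM (what is proved, stated in full; the proofs are below) =====
def Claim_equal_detects_weakening_py : Prop := ∀ (changes : List String), Dom_detects_weakening_py changes → Spec_detects_weakening_py changes (detects_weakening_py changes)

-- ===== LEMMAS AND PROOFS =====

-- the dispatch table, evaluated
lemma pvByFirst_eval : pvByFirst = PySem.Dict.mk
    [('b', ["budget_increased"]),
     ('t', ["threshold_relaxed", "timeline_extended"]),
     ('p', ["protection_removed"])] := by decide

-- a hit of one candidate indicator makes the scan true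
lemma pvScan_of_isIn (s ind : List Char) (c : Char) (hhead : ind.head? = some c)
    (hmem : (ind : List Char) ≠ [])
    (hcand : String.ofList ind ∈ pvByFirst.getD c [])
    (hin : PySem.Chars.isIn ind s = true) : pvScan s = true := by
  obtain ⟨j, hpre⟩ := (PySem.Chars.exists_prefix_drop_iff_isIn ind s).mpr hin
  have hjlt : j < s.length := by
    by_contra hge
    have : s.drop j = [] := List.drop_eq_nil_of_le (by omega)
    rw [this, List.prefix_nil] at hpre
    exact hmem hpre
  have hget : s[j]? = some c := by
    have h0 : (s.drop j)[0]? = some c := by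
      cases ind with
      | nil => exact absurd rfl hmem
      | cons x xs =>
        obtain ⟨t, ht⟩ := hpre
        simp at hhead
        rw [← ht]
        simp [hhead]
    rw [List.getElem?_drop, Nat.add_zero] at h0
    exact h0
  unfold pvScan
  rw [List.any_eq_true]
  refine ⟨j, List.mem_range.mpr hjlt, ?_⟩
  rw [hget]
  simp only [List.any_eq_true]
  exact ⟨String.ofList ind, hcand, (PySem.Chars.startswith_iff _ _).mpr (by simpa using hpre)⟩

-- the scan is exactly "some indicator occurs"
lemma pvScan_eq (s : List Char) :
    pvScan s = (PySem.Chars.isIn "budget_increased".toList s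
      || PySem.Chars.isIn "threshold_relaxed".toList s
      || PySem.Chars.isIn "protection_removed".toList s
      || PySem.Chars.isIn "timeline_extended".toList s) := by
  apply Bool.eq_iff_iff.mpr
  simp only [Bool.or_eq_true]
  constructor
  · intro h
    unfold pvScan at h
    rw [List.any_eq_true] at h
    obtain ⟨i, hi, hmatch⟩ := h
    rw [List.mem_range] at hi
    rw [List.getElem?_eq_getElem hi] at hmatch
    simp only [List.any_eq_true] at hmatch
    obtain ⟨ind, hind, hstart⟩ := hmatch
    have hpre := (PySem.Chars.startswith_iff _ _).mp hstart
    have hin : PySem.Chars.isIn ind.toList s = true :=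
      (PySem.Chars.exists_prefix_drop_iff_isIn _ _).mp ⟨i, hpre⟩
    rw [pvByFirst_eval] at hind
    by_cases h1 : ('b' == s[i]) <;> by_cases h2 : ('t' == s[i]) <;> by_cases h3 : ('p' == s[i]) <;>
      simp [PySem.Dict.getD_eq_get?_getD, PySem.Dict.get?, List.find?, h1, h2, h3] at hind <;>
      rcases hind with rfl | rfl <;> simp_all
  · rintro (((h | h) | h) | h)
    · exact pvScan_of_isIn _ _ 'b' rfl (by decide) (by rw [pvByFirst_eval]; decide) h
    · exact pvScan_of_isIn _ _ 't' rfl (by decide) (by rw [pvByFirst_eval]; decide) h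
    · exact pvScan_of_isIn _ _ 'p' rfl (by decide) (by rw [pvByFirst_eval]; decide) h
    · exact pvScan_of_isIn _ _ 't' rfl (by decide) (by rw [pvByFirst_eval]; decide) h

-- ===== VERDICT (by name: the statement is the Claim_ definition above) =====
theorem detects_weakening_py_spec : Claim_equal_detects_weakening_py := by
  intro changes _
  show detects_weakening_py changes = detects_weakening_py_alt changes
  unfold detects_weakening_py detects_weakening_py_alt
  apply List.any_congr rfl
  intro change
  rw [pvScan_eq]
  simp only [List.any_cons, List.any_nil, Bool.or_false]
  rw [PySem.Str.isIn_eq, PySem.Str.isIn_eq, PySem.Str.isIn_eq, PySem.Str.isIn_eq,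
    PySem.Str.toList_lower]
  simp [Bool.or_assoc]
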